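-- pv_equiv track=rewrite | github.com/MatheusSantosDS/digits | representacao.py | somar_pixels
-- ===== SOURCE A (Python) =====
-- def somar_pixels(img):
--   #Soma das linhas e das colunas
--   soma_horizontal = []
--   soma_vertical = []
--
--   #Preenche vetor coluna com 0's
--   for x in range(len(img[0])):
--     soma_vertical.append(0)
--
--   for i in range(len(img)):
--     sum = 0
--
--     for j in range(len(img[i])):
--
--       #binarizando o valor
--       if(img[i][j] > 127):
--         soma_vertical[j] += 1
--         sum += 1
--
--     soma_horizontal.append(sum)
--
--   return soma_horizontal, soma_vertical
-- ===== SOURCE B (Python) =====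
-- def somar_pixels(img):
--   # Count of binarized (>127) pixels per row, then per column (transposed pass).
--   largura = len(img[0])
--   soma_horizontal = [sum(1 for p in row if p > 127) for row in img]
--   soma_vertical = [sum(1 for row in img if j < len(row) and row[j] > 127)
--                    for j in range(largura)]
--   return soma_horizontal, soma_vertical
-- ===== Notes on version B (the rewrite author's own statement) =====
-- stated objective: simpler
-- what changed: Replaces the fused index loop that threads a mutable vertical accumulator through every row with two independent comprehensions: a per-row count, and a column-wise (transposed) count over each column index j.
import Mathlib
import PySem

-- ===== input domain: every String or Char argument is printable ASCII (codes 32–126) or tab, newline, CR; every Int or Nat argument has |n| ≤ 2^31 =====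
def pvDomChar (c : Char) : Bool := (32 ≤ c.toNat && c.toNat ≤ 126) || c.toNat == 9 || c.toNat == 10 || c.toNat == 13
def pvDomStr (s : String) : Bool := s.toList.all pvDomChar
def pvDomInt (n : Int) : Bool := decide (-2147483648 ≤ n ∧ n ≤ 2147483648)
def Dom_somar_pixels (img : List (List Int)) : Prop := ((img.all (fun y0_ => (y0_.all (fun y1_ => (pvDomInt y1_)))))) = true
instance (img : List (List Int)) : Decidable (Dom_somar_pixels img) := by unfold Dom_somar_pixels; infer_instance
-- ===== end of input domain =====

-- B replaces A's fused index loop (which threads a mutable vertical accumulator through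
-- every row) with two independent passes: a per-row count and a transposed per-column count.


-- ===== PORT A =====
-- Literal port of A: build soma_vertical by appending 0 once per x in range(len(img[0]));
-- then for i in range(len(img)): for j in range(len(img[i])): if img[i][j] > 127 bump
-- soma_vertical[j] and sum; append sum to soma_horizontal.  (img[0] on empty img and the
-- out-of-range soma_vertical[j] write raise in Python; those inputs are outside Pre_.)
def somar_pixels (img : List (List Int)) : List Int × List Int :=
  let soma_vertical : List Int :=
    (PySem.List.pyRange 0 ((img.headD []).length : Int) 1).foldl
      (fun sv _ => sv ++ [(0 : Int)]) []
  let r :=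
    (PySem.List.pyRange 0 (img.length : Int) 1).foldl
      (fun (st : List Int × List Int) (i : Int) =>
        let row := PySem.List.pyGetD img i []
        let r2 :=
          (PySem.List.pyRange 0 (row.length : Int) 1).foldl
            (fun (st2 : Int × List Int) (j : Int) =>
              if 127 < PySem.List.pyGetD row j 0 then
                (st2.1 + 1, st2.2.set j.toNat (st2.2.getD j.toNat 0 + 1))
              else st2)
            (0, st.2)
        (st.1 ++ [r2.1], r2.2))
      (([] : List Int), soma_vertical)
  (r.1, r.2)

-- ===== PORT B =====
-- Literal port of B: per-row counts, then a per-column (transposed) count for each j < largura.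
def somar_pixels_alt (img : List (List Int)) : List Int × List Int :=
  let largura := (img.headD []).length
  let soma_horizontal : List Int :=
    img.map (fun row => ((row.filter (fun p => 127 < p)).length : Int))
  let soma_vertical : List Int :=
    (List.range largura).map (fun j =>
      ((img.filter (fun row => decide (j < row.length) && decide (127 < row.getD j 0))).length : Int))
  (soma_horizontal, soma_vertical)

-- ===== PRECONDITION & SPEC =====
-- Pre_ excludes exactly the inputs where Python A raises IndexError: empty img (img[0]),
-- and ragged images where some row has a pixel > 127 at an index ≥ len(img[0])
-- (the write soma_vertical[j] is then out of range).
def Pre_somar_pixels (img : List (List Int)) : Prop :=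
  img ≠ [] ∧ ∀ row ∈ img, ∀ x ∈ row.drop (img.headD []).length, x ≤ 127
instance (img : List (List Int)) : Decidable (Pre_somar_pixels img) := by
  unfold Pre_somar_pixels; infer_instance
def pvWitness_somar_pixels : List (List Int) := [[200, 1], [0, 130], [128, 128]]

def Spec_somar_pixels (img : List (List Int)) (out : List Int × List Int) : Prop := out = somar_pixels_alt img
instance (img : List (List Int)) (out : List Int × List Int) : Decidable (Spec_somar_pixels img out) := by unfold Spec_somar_pixels; infer_instance

-- ===== CLAIM (what is proved, stated in full; the proofs are below) =====
def Claim_equal_somar_pixels : Prop := ∀ (img : List (List Int)), Dom_somar_pixels img → Pre_somar_pixels img → Spec_somar_pixels img (somar_pixels img)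
-- ===== LEMMAS AND PROOFS =====

-- contribution of a row starting at offset s to vertical cell j
def pvBump (s : Nat) (row : List Int) (j : Nat) : Int :=
  if s ≤ j ∧ j - s < row.length ∧ 127 < row.getD (j - s) 0 then 1 else 0

lemma pvBump_succ (x : Int) (rest : List Int) (s j : Nat) (h : j ≠ s) :
    pvBump (s + 1) rest j = pvBump s (x :: rest) j := by
  unfold pvBump
  rcases Nat.lt_or_ge j s with hlt | hge
  · rw [if_neg (fun hc => absurd hc.1 (by omega)),
        if_neg (fun hc => absurd hc.1 (by omega))]
  · have e1 : j - s = (j - (s + 1)) + 1 := by omega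
    rw [e1]
    simp only [List.getD_cons_succ, List.length_cons]
    refine if_congr ?_ rfl rfl
    constructor <;> rintro ⟨a, b, c⟩ <;> exact ⟨by omega, by omega, c⟩

lemma pvInner_fold (row : List Int) (s : Nat) (acc : Int) (sv : List Int)
    (hw : ∀ k, (hk : k < row.length) → 127 < row[k] → s + k < sv.length) :
    (PySem.List.enumerate row (s : Int)).foldl
      (fun (st2 : Int × List Int) (p : Int × Int) =>
        if 127 < p.2 then (st2.1 + 1, st2.2.set p.1.toNat (st2.2.getD p.1.toNat 0 + 1)) else st2)
      (acc, sv)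
    = (acc + (row.countP (fun p => 127 < p) : Int),
       List.mapIdx (fun j v => v + pvBump s row j) sv) := by
  induction row generalizing s acc sv with
  | nil =>
      simp [PySem.List.enumerate_nil]
      apply List.ext_getElem (by simp)
      intro j h1 h2
      simp [pvBump]
  | cons x rest ih =>
      rw [PySem.List.enumerate_cons]
      simp only [List.foldl_cons]
      by_cases h127 : 127 < x
      · rw [if_pos h127]
        have hs : s < sv.length := by
          have := hw 0 (by simp) (by simpa using h127); omega
        have hstoNat : ((s : Int)).toNat = s := by simp
        rw [hstoNat]
        rw [show ((s : Int) + 1) = (((s + 1 : Nat)) : Int) by push_cast; ring]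
        rw [ih (s + 1) (acc + 1) _ (by
          intro k hk hgt
          have := hw (k + 1) (by simpa using Nat.succ_lt_succ hk) (by simpa using hgt)
          simpa using by omega)]
        simp only [Prod.mk.injEq]
        constructor
        · have hc : List.countP (fun p => decide (127 < p)) (x :: rest)
              = List.countP (fun p => decide (127 < p)) rest + 1 := by
            simp [h127]
          rw [hc]; push_cast; ring
        · apply List.ext_getElem (by simp)
          intro j h1 h2
          simp only [List.getElem_mapIdx]
          by_cases hj : j = s
          · subst hj
            rw [List.getElem_set_self]
            rw [List.getD_eq_getElem sv 0 hs]
            have b1 : pvBump (j + 1) rest j = 0 := by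
              unfold pvBump; rw [if_neg (fun hc => absurd hc.1 (by omega))]
            have b2 : pvBump j (x :: rest) j = 1 := by
              unfold pvBump
              rw [if_pos ⟨le_refl j, by simp, by simpa using h127⟩]
            rw [b1, b2]; ring
          · rw [List.getElem_set_ne (fun he => hj (by omega))]
            rw [pvBump_succ x rest s j hj]
      · rw [if_neg h127]
        rw [show ((s : Int) + 1) = (((s + 1 : Nat)) : Int) by push_cast; ring]
        rw [ih (s + 1) acc sv (by
          intro k hk hgt
          have := hw (k + 1) (by simpa using Nat.succ_lt_succ hk) (by simpa using hgt)
          simpa using by omega)]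
        simp only [Prod.mk.injEq]
        constructor
        · simp [h127]
        · apply List.ext_getElem (by simp)
          intro j h1 h2
          simp only [List.getElem_mapIdx]
          by_cases hj : j = s
          · subst hj
            have b1 : pvBump (j + 1) rest j = 0 := by
              unfold pvBump; rw [if_neg (fun hc => absurd hc.1 (by omega))]
            have b2 : pvBump j (x :: rest) j = 0 := by
              unfold pvBump
              rw [if_neg (fun hc => absurd hc.2.2 (by simpa using h127))]
            rw [b1, b2]
          · rw [pvBump_succ x rest s j hj]

-- total contribution of all rows to vertical cell j (B's column count)
def pvColcnt (img : List (List Int)) (j : Nat) : Int :=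
  ((img.countP (fun row => decide (j < row.length) && decide (127 < row.getD j 0))) : Int)

lemma pvBump_zero (row : List Int) (j : Nat) :
    pvBump 0 row j =
      if (decide (j < row.length) && decide (127 < row.getD j 0)) = true then 1 else 0 := by
  unfold pvBump
  refine if_congr ?_ rfl rfl
  simp

lemma pvOuter_fold (img : List (List Int)) (sh : List Int) (sv : List Int)
    (h : ∀ row ∈ img, ∀ k, (hk : k < row.length) → 127 < row[k] → k < sv.length) :
    img.foldl
      (fun (st : List Int × List Int) (row : List Int) =>
        let r2 :=
          (PySem.List.enumerate row (0 : Int)).foldl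
            (fun (st2 : Int × List Int) (p : Int × Int) =>
              if 127 < p.2 then (st2.1 + 1, st2.2.set p.1.toNat (st2.2.getD p.1.toNat 0 + 1)) else st2)
            (0, st.2)
        (st.1 ++ [r2.1], r2.2))
      (sh, sv)
    = (sh ++ img.map (fun row => ((row.countP (fun p => 127 < p)) : Int)),
       List.mapIdx (fun j v => v + pvColcnt img j) sv) := by
  induction img generalizing sh sv with
  | nil =>
      simp [pvColcnt]
      apply List.ext_getElem (by simp)
      intro j h1 h2
      simp
  | cons row rest ih =>
      simp only [List.foldl_cons]
      have hw : ∀ k, (hk : k < row.length) → 127 < row[k] → 0 + k < sv.length := by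
        intro k hk hgt
        simpa using h row (by simp) k hk hgt
      have hin := pvInner_fold row 0 0 sv hw
      rw [Nat.cast_zero] at hin
      rw [hin]
      rw [ih (sh ++ [(0 : Int) + (row.countP (fun p => 127 < p) : Int)]) _ (by
        intro r hr k hk hgt
        have := h r (by simp [hr]) k hk hgt
        simpa using this)]
      simp only [Prod.mk.injEq]
      constructor
      · simp
      · apply List.ext_getElem (by simp)
        intro j h1 h2
        simp only [List.getElem_mapIdx]
        have : pvColcnt (row :: rest) j = pvBump 0 row j + pvColcnt rest j := by
          unfold pvColcnt
          rw [List.countP_cons, pvBump_zero]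
          rcases Bool.eq_false_or_eq_true
              (decide (j < row.length) && decide (127 < row.getD j 0)) with hp | hp <;>
            (rw [hp]; simp; try ring)
        rw [this]
        ring

lemma pvFold_append_zero (l : List Int) (init : List Int) :
    l.foldl (fun sv _ => sv ++ [(0 : Int)]) init = init ++ List.replicate l.length 0 := by
  induction l generalizing init with
  | nil => simp
  | cons x rest ih =>
      simp only [List.foldl_cons, List.length_cons, ih, List.replicate_succ]
      simp

-- ===== VERDICT (by name: the statement is the Claim_ definition above) =====
theorem somar_pixels_spec : Claim_equal_somar_pixels := by
  intro img _ hpre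
  obtain ⟨hne, hflat⟩ := hpre
  unfold Spec_somar_pixels somar_pixels somar_pixels_alt
  set w := (img.headD []).length with hw
  -- the in-range condition from Pre_
  have hrange : ∀ row ∈ img, ∀ k, (hk : k < row.length) → 127 < row[k] → k < w := by
    intro row hrow k hk hgt
    by_contra hge
    rw [Nat.not_lt] at hge
    have hmem : row[k] ∈ row.drop w := by
      have hk' : k - w < (row.drop w).length := by
        simp [List.length_drop]; omega
      have : (row.drop w)[k - w] = row[k] := by
        rw [List.getElem_drop]
        congr 1; omega
      rw [← this]
      exact List.getElem_mem hk'
    have := hflat row hrow _ hmem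
    omega
  -- step 1: initial vertical vector is replicate w 0
  have hsv0 : (PySem.List.pyRange 0 (w : Int) 1).foldl (fun sv _ => sv ++ [(0 : Int)]) []
      = List.replicate w (0 : Int) := by
    rw [pvFold_append_zero]
    simp [PySem.List.length_pyRange_one]
  simp only []
  rw [hsv0]
  -- step 2: the outer index loop is a fold over img
  rw [PySem.List.foldl_pyRange_zero_pyGetD' img []
    (fun (st : List Int × List Int) (row : List Int) =>
        let r2 :=
          (PySem.List.pyRange 0 (row.length : Int) 1).foldl
            (fun (st2 : Int × List Int) (j : Int) =>
              if 127 < PySem.List.pyGetD row j 0 then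
                (st2.1 + 1, st2.2.set j.toNat (st2.2.getD j.toNat 0 + 1))
              else st2)
            (0, st.2)
        (st.1 ++ [r2.1], r2.2))
    (([] : List Int), List.replicate w (0 : Int))]
  -- step 3: each inner index loop is a fold over enumerate row
  have hinner : ∀ (row : List Int) (init : Int × List Int),
      (PySem.List.pyRange 0 (row.length : Int) 1).foldl
        (fun (st2 : Int × List Int) (j : Int) =>
          if 127 < PySem.List.pyGetD row j 0 then
            (st2.1 + 1, st2.2.set j.toNat (st2.2.getD j.toNat 0 + 1))
          else st2) init
      = (PySem.List.enumerate row (0 : Int)).foldl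
          (fun (st2 : Int × List Int) (p : Int × Int) =>
            if 127 < p.2 then (st2.1 + 1, st2.2.set p.1.toNat (st2.2.getD p.1.toNat 0 + 1)) else st2)
          init := by
    intro row init
    rw [PySem.List.enumerate_eq_map_pyRange (d := 0), List.foldl_map]
    simp [PySem.List.len_eq]
  simp only [hinner]
  rw [pvOuter_fold img [] (List.replicate w 0) (by
    intro row hrow k hk hgt
    have := hrange row hrow k hk hgt
    simpa using this)]
  simp only [Prod.mk.injEq]
  constructor
  · simp [List.countP_eq_length_filter]
  · apply List.ext_getElem (by simp)
    intro j h1 h2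
    simp only [List.getElem_mapIdx, List.getElem_map, List.getElem_range,
      List.getElem_replicate]
    unfold pvColcnt
    rw [List.countP_eq_length_filter]
    ring
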